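-- pv_equiv track=rewrite | github.com/thekatieharper/thekatieharper.github.io | sync_complete.py | generate_writing_section
-- ===== SOURCE A (Python) =====
-- def add_utm_to_url(url):
--     """Add UTM tracking to external URLs"""
--     separator = '&' if '?' in url else '?'
--     return f"{url}{separator}ref=katieharper"
--
-- def generate_writing_section(items):
--     """Generate the Writing section HTML for homepage"""
--
--     # Group items by category
--     tactical = [item for item in items if item['category'] == 'Tactical']
--     personal = [item for item in items if item['category'] == 'Personal']
--     recs = [item for item in items if item['category'] == 'Recommendations']
--
--     html = '<h2>Writing</h2>\n\n'
--
--     # Tactical startup advice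
--     if tactical:
--         html += '<p>Tactical startup advice:</p>\n\n<p>'
--         links = []
--         for item in tactical:
--             if item['type'] == 'Post':
--                 links.append(f'<a href="{item["slug"]}.html">{item["title"]}</a>')
--             else:
--                 tracked_url = add_utm_to_url(item['url'])
--                 links.append(f'<a href="{tracked_url}">{item["title"]}</a>')
--         html += ' · '.join(links)
--         html += '</p>\n\n'
--
--     # Other life thoughts
--     if personal:
--         html += '<p>Other life thoughts:</p>\n\n<p>'
--         links = []
--         for item in personal:
--             if item['type'] == 'Post':
--                 links.append(f'<a href="{item["slug"]}.html">{item["title"]}</a>')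
--             else:
--                 tracked_url = add_utm_to_url(item['url'])
--                 links.append(f'<a href="{tracked_url}">{item["title"]}</a>')
--         html += ' · '.join(links)
--         html += '</p>\n\n'
--
--     # Recommendations
--     if recs:
--         html += '<p>Recommendations:</p>\n\n<p>'
--         links = []
--         for item in recs:
--             tracked_url = add_utm_to_url(item['url'])
--             links.append(f'<a href="{tracked_url}">{item["title"]}</a>')
--         html += ' · '.join(links)
--         html += '</p>\n\n'
--
--     return html
-- ===== SOURCE B (Python) =====
-- def add_utm_to_url(url):
--     """Add UTM tracking to external URLs"""
--     separator = '&' if '?' in url else '?'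
--     return f"{url}{separator}ref=katieharper"
--
-- def generate_writing_section(items):
--     """Generate the Writing section HTML for homepage"""
--     # Single pass: no intermediate lists at all. Three running joined-string
--     # accumulators (None = category not seen yet); each item's link is appended
--     # to the right accumulator with the ' . ' separator as we go.
--     tac = per = rec = None
--     for item in items:
--         cat = item['category']
--         if cat == 'Tactical' or cat == 'Personal':
--             if item['type'] == 'Post':
--                 link = f'<a href="{item["slug"]}.html">{item["title"]}</a>'
--             else:
--                 link = f'<a href="{add_utm_to_url(item["url"])}">{item["title"]}</a>'
--             if cat == 'Tactical':
--                 tac = link if tac is None else tac + ' · ' + link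
--             else:
--                 per = link if per is None else per + ' · ' + link
--         elif cat == 'Recommendations':
--             link = f'<a href="{add_utm_to_url(item["url"])}">{item["title"]}</a>'
--             rec = link if rec is None else rec + ' · ' + link
--
--     out = '<h2>Writing</h2>\n\n'
--     for head, acc in (('Tactical startup advice', tac),
--                       ('Other life thoughts', per),
--                       ('Recommendations', rec)):
--         if acc is not None:
--             out += f'<p>{head}:</p>\n\n<p>{acc}</p>\n\n'
--     return out
-- ===== Notes on version B (the rewrite author's own statement) =====
-- stated objective: alternative
-- what changed: B replaces A's three filter scans, per-category link lists and join calls with one pass over items that maintains three running joined-string accumulators (None = category unseen), appending each link with its separator as it is encountered; no intermediate lists are built.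
import Mathlib
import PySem

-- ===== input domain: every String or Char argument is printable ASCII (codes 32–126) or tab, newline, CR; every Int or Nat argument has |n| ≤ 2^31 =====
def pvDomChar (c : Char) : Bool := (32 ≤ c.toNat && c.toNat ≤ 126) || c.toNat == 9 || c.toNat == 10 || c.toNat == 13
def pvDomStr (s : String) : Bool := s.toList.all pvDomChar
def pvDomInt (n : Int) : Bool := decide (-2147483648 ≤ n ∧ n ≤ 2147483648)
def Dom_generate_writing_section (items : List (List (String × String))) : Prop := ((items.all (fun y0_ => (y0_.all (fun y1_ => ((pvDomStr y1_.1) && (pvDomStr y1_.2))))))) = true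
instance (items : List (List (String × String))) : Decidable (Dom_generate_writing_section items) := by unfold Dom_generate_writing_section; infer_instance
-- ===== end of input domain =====

-- B is an ALTERNATIVE single-pass algorithm: instead of A's three filter scans that build
-- link LISTS and join them, B keeps three running joined-string accumulators (Option String,
-- none = category unseen) and appends each link with its separator as it is encountered.

-- ===== PORT A =====
-- item['k']; Pre_ guarantees the key is present wherever A evaluates this (KeyError excluded by Pre_)
def pvGetK (it : List (String × String)) (k : String) : String :=
  ((PySem.Dict.mk it).get? k).getD ""

def add_utm_to_url (url : String) : String :=
  if PySem.Str.isIn "?" url then url ++ "&ref=katieharper" else url ++ "?ref=katieharper"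

def generate_writing_section (items : List (List (String × String))) : String :=
  let tactical := items.filter (fun it => pvGetK it "category" == "Tactical")
  let personal := items.filter (fun it => pvGetK it "category" == "Personal")
  let recs := items.filter (fun it => pvGetK it "category" == "Recommendations")
  let html := "<h2>Writing</h2>\n\n"
  let html :=
    if tactical.isEmpty then html else
      let links := tactical.foldl (fun ls it =>
        ls ++ [if pvGetK it "type" == "Post" then
                 "<a href=\"" ++ pvGetK it "slug" ++ ".html\">" ++ pvGetK it "title" ++ "</a>"
               else
                 "<a href=\"" ++ add_utm_to_url (pvGetK it "url") ++ "\">" ++ pvGetK it "title" ++ "</a>"]) []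
      html ++ "<p>Tactical startup advice:</p>\n\n<p>" ++ PySem.Str.join " · " links ++ "</p>\n\n"
  let html :=
    if personal.isEmpty then html else
      let links := personal.foldl (fun ls it =>
        ls ++ [if pvGetK it "type" == "Post" then
                 "<a href=\"" ++ pvGetK it "slug" ++ ".html\">" ++ pvGetK it "title" ++ "</a>"
               else
                 "<a href=\"" ++ add_utm_to_url (pvGetK it "url") ++ "\">" ++ pvGetK it "title" ++ "</a>"]) []
      html ++ "<p>Other life thoughts:</p>\n\n<p>" ++ PySem.Str.join " · " links ++ "</p>\n\n"
  let html :=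
    if recs.isEmpty then html else
      let links := recs.foldl (fun ls it =>
        ls ++ ["<a href=\"" ++ add_utm_to_url (pvGetK it "url") ++ "\">" ++ pvGetK it "title" ++ "</a>"]) []
      html ++ "<p>Recommendations:</p>\n\n<p>" ++ PySem.Str.join " · " links ++ "</p>\n\n"
  html

-- ===== PORT B =====
-- acc = link if acc is None else acc + ' · ' + link
def pvAdd (acc : Option String) (link : String) : Option String :=
  some (match acc with | none => link | some s => s ++ " · " ++ link)

def pvLinkSlug (it : List (String × String)) : String :=
  if pvGetK it "type" == "Post" then
    "<a href=\"" ++ pvGetK it "slug" ++ ".html\">" ++ pvGetK it "title" ++ "</a>"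
  else
    "<a href=\"" ++ add_utm_to_url (pvGetK it "url") ++ "\">" ++ pvGetK it "title" ++ "</a>"

def pvLinkUrl (it : List (String × String)) : String :=
  "<a href=\"" ++ add_utm_to_url (pvGetK it "url") ++ "\">" ++ pvGetK it "title" ++ "</a>"

-- the loop body: route this item's link into the right accumulator
def pvStep (st : Option String × Option String × Option String) (it : List (String × String)) :
    Option String × Option String × Option String :=
  let cat := pvGetK it "category"
  if cat == "Tactical" || cat == "Personal" then
    let link := pvLinkSlug it
    if cat == "Tactical" then (pvAdd st.1 link, st.2.1, st.2.2)
    else (st.1, pvAdd st.2.1 link, st.2.2)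
  else if cat == "Recommendations" then (st.1, st.2.1, pvAdd st.2.2 (pvLinkUrl it))
  else st

def pvWrap (head : String) : Option String → String
  | none => ""
  | some s => "<p>" ++ head ++ ":</p>\n\n<p>" ++ s ++ "</p>\n\n"

def generate_writing_section_alt (items : List (List (String × String))) : String :=
  let st := items.foldl pvStep (none, none, none)
  "<h2>Writing</h2>\n\n"
    ++ pvWrap "Tactical startup advice" st.1
    ++ pvWrap "Other life thoughts" st.2.1
    ++ pvWrap "Recommendations" st.2.2

-- ===== PRECONDITION & SPEC =====
-- Pre_ excludes exactly the inputs where Python A raises KeyError: an item missing 'category', or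
-- missing the keys ('type'/'title' and 'slug' or 'url') that its category makes A read.
def pvItemOK (it : List (String × String)) : Bool :=
  let d := PySem.Dict.mk it
  d.contains "category" &&
    (let cat := pvGetK it "category"
     if cat == "Tactical" || cat == "Personal" then
       d.contains "type" && d.contains "title" &&
         (if pvGetK it "type" == "Post" then d.contains "slug" else d.contains "url")
     else if cat == "Recommendations" then d.contains "url" && d.contains "title"
     else true)

def Pre_generate_writing_section (items : List (List (String × String))) : Prop :=
  items.all pvItemOK = true
instance (items : List (List (String × String))) : Decidable (Pre_generate_writing_section items) := by
  unfold Pre_generate_writing_section; infer_instance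

def pvWitness_generate_writing_section : (List (List (String × String))) :=
  [[("category", "Tactical"), ("type", "Post"), ("slug", "why"), ("title", "Why")],
   [("category", "Recommendations"), ("url", "http://x?a=1"), ("title", "R")]]

def Spec_generate_writing_section (items : List (List (String × String))) (out : String) : Prop := out = generate_writing_section_alt items
instance (items : List (List (String × String))) (out : String) : Decidable (Spec_generate_writing_section items out) := by unfold Spec_generate_writing_section; infer_instance

-- ===== CLAIM (what is proved, stated in full; the proofs are below) =====
def Claim_equal_generate_writing_section : Prop := ∀ (items : List (List (String × String))), Dom_generate_writing_section items → Pre_generate_writing_section items → Spec_generate_writing_section items (generate_writing_section items)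

-- ===== LEMMAS AND PROOFS =====

-- B's one-pass fold, componentwise: each accumulator is the pvAdd-fold over that category's links
theorem pvStep_fold (items : List (List (String × String)))
    (t p r : Option String) :
    items.foldl pvStep (t, p, r) =
      ( ((items.filter (fun it => pvGetK it "category" == "Tactical")).map pvLinkSlug).foldl pvAdd t,
        ((items.filter (fun it => pvGetK it "category" == "Personal")).map pvLinkSlug).foldl pvAdd p,
        ((items.filter (fun it => pvGetK it "category" == "Recommendations")).map pvLinkUrl).foldl pvAdd r ) := by
  induction items generalizing t p r with
  | nil => simp
  | cons it rest ih =>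
    simp only [List.foldl_cons, List.filter_cons]
    by_cases hT : pvGetK it "category" = "Tactical"
    · simp [pvStep, hT, ih]
    · by_cases hP : pvGetK it "category" = "Personal"
      · simp [pvStep, hP, ih]
      · by_cases hR : pvGetK it "category" = "Recommendations"
        · simp [pvStep, hR, ih]
        · simp [pvStep, hT, hP, hR, ih]

-- the pvAdd-fold from a started accumulator
theorem pvAdd_fold_some (ls : List String) (s : String) :
    ls.foldl pvAdd (some s) = some (ls.foldl (fun a y => a ++ " · " ++ y) s) := by
  induction ls generalizing s with
  | nil => rfl
  | cons x xs ih => simp [pvAdd, ih]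

-- joining with the head merged in is joining the longer list
theorem pvJoin_merge (a b : String) (l : List String) :
    PySem.Str.join " · " ((a ++ " · " ++ b) :: l) = PySem.Str.join " · " (a :: b :: l) := by
  apply String.toList_inj.mp
  cases l with
  | nil => simp [PySem.Str.join, PySem.Chars.join_singleton, PySem.Chars.join_cons_cons]
  | cons c l' => simp [PySem.Str.join, PySem.Chars.join_cons_cons]

-- ' · '.join written as a left fold
theorem pvJoin_foldl (x : String) (xs : List String) :
    PySem.Str.join " · " (x :: xs) = xs.foldl (fun a y => a ++ " · " ++ y) x := by
  induction xs generalizing x with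
  | nil => simp [PySem.Str.join]
  | cons y ys ih => rw [List.foldl_cons, ← ih, pvJoin_merge]

-- the pvAdd-fold from none computes none on [], the join otherwise
theorem pvAdd_fold_none (ls : List String) :
    ls.foldl pvAdd none =
      if ls.isEmpty then none else some (PySem.Str.join " · " ls) := by
  cases ls with
  | nil => rfl
  | cons x xs =>
    rw [List.foldl_cons, show pvAdd none x = some x from rfl, pvAdd_fold_some, pvJoin_foldl]
    simp

-- A's link loop (append-singleton fold) is the map of the link function
theorem pvLinks_slug (l : List (List (String × String))) :
    l.foldl (fun ls it =>
        ls ++ [if pvGetK it "type" == "Post" then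
                 "<a href=\"" ++ pvGetK it "slug" ++ ".html\">" ++ pvGetK it "title" ++ "</a>"
               else
                 "<a href=\"" ++ add_utm_to_url (pvGetK it "url") ++ "\">" ++ pvGetK it "title" ++ "</a>"]) [] =
      l.map pvLinkSlug := by
  rw [PySem.List.foldl_append_singleton_eq_map]
  simp [pvLinkSlug]

theorem pvLinks_url (l : List (List (String × String))) :
    l.foldl (fun ls it =>
        ls ++ ["<a href=\"" ++ add_utm_to_url (pvGetK it "url") ++ "\">" ++ pvGetK it "title" ++ "</a>"]) [] =
      l.map pvLinkUrl := by
  rw [PySem.List.foldl_append_singleton_eq_map]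
  simp [pvLinkUrl]

-- A's conditional block append is appending pvWrap of B's accumulator
theorem pvCondT (x : String) (bucket : List (List (String × String))) :
    (if bucket.isEmpty then x else
       x ++ "<p>Tactical startup advice:</p>\n\n<p>" ++ PySem.Str.join " · " (bucket.map pvLinkSlug) ++ "</p>\n\n") =
      x ++ pvWrap "Tactical startup advice" ((bucket.map pvLinkSlug).foldl pvAdd none) := by
  rw [pvAdd_fold_none]
  by_cases h : bucket.isEmpty
  · simp [h, pvWrap]
  · simp only [h, Bool.false_eq_true, if_false, List.isEmpty_map, pvWrap]
    rw [show ("<p>" ++ "Tactical startup advice" ++ ":</p>\n\n<p>" : String) = "<p>Tactical startup advice:</p>\n\n<p>" from by decide]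
    simp [String.append_assoc]

theorem pvCondP (x : String) (bucket : List (List (String × String))) :
    (if bucket.isEmpty then x else
       x ++ "<p>Other life thoughts:</p>\n\n<p>" ++ PySem.Str.join " · " (bucket.map pvLinkSlug) ++ "</p>\n\n") =
      x ++ pvWrap "Other life thoughts" ((bucket.map pvLinkSlug).foldl pvAdd none) := by
  rw [pvAdd_fold_none]
  by_cases h : bucket.isEmpty
  · simp [h, pvWrap]
  · simp only [h, Bool.false_eq_true, if_false, List.isEmpty_map, pvWrap]
    rw [show ("<p>" ++ "Other life thoughts" ++ ":</p>\n\n<p>" : String) = "<p>Other life thoughts:</p>\n\n<p>" from by decide]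
    simp [String.append_assoc]

theorem pvCondR (x : String) (bucket : List (List (String × String))) :
    (if bucket.isEmpty then x else
       x ++ "<p>Recommendations:</p>\n\n<p>" ++ PySem.Str.join " · " (bucket.map pvLinkUrl) ++ "</p>\n\n") =
      x ++ pvWrap "Recommendations" ((bucket.map pvLinkUrl).foldl pvAdd none) := by
  rw [pvAdd_fold_none]
  by_cases h : bucket.isEmpty
  · simp [h, pvWrap]
  · simp only [h, Bool.false_eq_true, if_false, List.isEmpty_map, pvWrap]
    rw [show ("<p>" ++ "Recommendations" ++ ":</p>\n\n<p>" : String) = "<p>Recommendations:</p>\n\n<p>" from by decide]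
    simp [String.append_assoc]

-- ===== VERDICT (by name: the statement is the Claim_ definition above) =====
theorem generate_writing_section_spec : Claim_equal_generate_writing_section := by
  intro items _ _
  show generate_writing_section items = generate_writing_section_alt items
  simp only [generate_writing_section, generate_writing_section_alt]
  rw [pvStep_fold]
  rw [pvLinks_slug, pvLinks_slug, pvLinks_url]
  rw [pvCondT, pvCondP, pvCondR]
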